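-- pv_equiv track=rewrite | github.com/linzhiqin2003/FileParsing | src/file_parse_engine/parsers/spreadsheet.py | _formula_annotation
-- ===== SOURCE A (Python) =====
-- _FORMULA_LABELS = {
--     "SUM": "sum",
--     "AVERAGE": "avg",
--     "COUNT": "count",
--     "MAX": "max",
--     "MIN": "min",
--     "VLOOKUP": "lookup",
--     "HLOOKUP": "lookup",
--     "IF": "conditional",
--     "SUMIF": "conditional sum",
--     "COUNTIF": "conditional count",
--     "INDEX": "index",
--     "MATCH": "match",
-- }
--
-- def _formula_annotation(formula: str) -> str:
--     """Convert an Excel formula to a short semantic annotation."""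
--     if not formula or not formula.startswith("="):
--         return ""
--
--     f_upper = formula[1:].strip().upper()
--
--     for func, label in _FORMULA_LABELS.items():
--         if f_upper.startswith(func + "("):
--             return f" <!-- {label}: {formula} -->"
--
--     # Generic formula
--     return f" <!-- formula: {formula} -->"
-- ===== SOURCE B (Python) =====
-- def _formula_annotation(formula: str) -> str:
--     """Convert an Excel formula to a short semantic annotation."""
--     if not formula or not formula.startswith("="):
--         return ""
--     body = formula[1:].strip().upper()
--     # single character scan: name = text before the first '(' (None if no paren)
--     name = None
--     for i, ch in enumerate(body):
--         if ch == "(":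
--             name = body[:i]
--             break
--     # hard-coded decision tree on the first letter instead of a label table
--     label = None
--     if name:
--         c = name[0]
--         if c == "S":
--             label = "sum" if name == "SUM" else "conditional sum" if name == "SUMIF" else None
--         elif c == "A":
--             label = "avg" if name == "AVERAGE" else None
--         elif c == "C":
--             label = "count" if name == "COUNT" else "conditional count" if name == "COUNTIF" else None
--         elif c == "M":
--             label = "max" if name == "MAX" else "min" if name == "MIN" else "match" if name == "MATCH" else None
--         elif c == "V" or c == "H":
--             label = "lookup" if name in ("VLOOKUP", "HLOOKUP") else None
--         elif c == "I":
--             label = "conditional" if name == "IF" else "index" if name == "INDEX" else None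
--     if label is None:
--         return f" <!-- formula: {formula} -->"
--     return f" <!-- {label}: {formula} -->"
-- ===== Notes on version B (the rewrite author's own statement) =====
-- stated objective: alternative
-- what changed: Drops the label table entirely: one character scan extracts the name before the first '(', then a hard-coded first-letter decision tree classifies it, instead of iterating the 12-entry dict testing startswith for each key.
import Mathlib
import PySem

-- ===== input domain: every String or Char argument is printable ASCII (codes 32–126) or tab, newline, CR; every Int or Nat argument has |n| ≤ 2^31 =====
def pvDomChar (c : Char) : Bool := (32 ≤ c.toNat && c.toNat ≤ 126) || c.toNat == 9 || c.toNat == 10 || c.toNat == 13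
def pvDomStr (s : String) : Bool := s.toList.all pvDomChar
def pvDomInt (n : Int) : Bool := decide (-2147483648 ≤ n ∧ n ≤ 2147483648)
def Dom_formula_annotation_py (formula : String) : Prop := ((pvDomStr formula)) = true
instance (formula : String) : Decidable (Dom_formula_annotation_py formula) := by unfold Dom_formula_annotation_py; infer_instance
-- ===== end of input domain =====

-- B drops the label table: one character scan extracts the name before the first '(' and a
-- hard-coded first-letter decision tree classifies it; equal return values on every input.

-- ===== PORT A =====
-- _FORMULA_LABELS in iteration (= insertion) order, keys as char lists
def pvLabels : List (List Char × String) :=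
  [("SUM".toList, "sum"), ("AVERAGE".toList, "avg"), ("COUNT".toList, "count"),
   ("MAX".toList, "max"), ("MIN".toList, "min"), ("VLOOKUP".toList, "lookup"),
   ("HLOOKUP".toList, "lookup"), ("IF".toList, "conditional"), ("SUMIF".toList, "conditional sum"),
   ("COUNTIF".toList, "conditional count"), ("INDEX".toList, "index"), ("MATCH".toList, "match")]

-- f" <!-- {label}: {formula} -->" (string build shared shape; List Char so the kernel can reduce it)
def pvAnnot (label : String) (formula : String) : String :=
  String.ofList (" <!-- ".toList ++ label.toList ++ ": ".toList ++ formula.toList ++ " -->".toList)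

-- the 'for func, label in _FORMULA_LABELS.items(): if f_upper.startswith(func + "("): return …' loop
def pvScan (f : List Char) : List (List Char × String) → Option String
  | [] => none
  | (k, lab) :: rest =>
    if PySem.Chars.startswith f (k ++ ['(']) then some lab else pvScan f rest

def formula_annotation_py (formula : String) : String :=
  if formula.toList.isEmpty || !PySem.Chars.startswith formula.toList ['='] then ""
  else  -- f_upper = formula[1:].strip().upper(), inlined
    match pvScan (PySem.Chars.upper (PySem.Chars.strip (PySem.List.slice formula.toList (some 1) none))) pvLabels with
    | some lab => pvAnnot lab formula
    | none => pvAnnot "formula" formula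

-- ===== PORT B =====
-- "for i, ch in enumerate(body): if ch == '(': name = body[:i]; break" — the loop building the
-- prefix before the first '(' is ported as the obvious structural recursion (exact)
def pvFindName : List Char → Option (List Char)
  | [] => none
  | c :: rest => if c = '(' then some [] else (pvFindName rest).map (c :: ·)

-- the first-letter decision tree of Source B, branch for branch ('name in (tuple)' = disjunction)
def pvLabelOf (name : List Char) : Option String :=
  match name with
  | [] => none          -- "if name:" — empty name classifies as nothing
  | c :: _ =>
    if c = 'S' then (if name = "SUM".toList then some "sum" else if name = "SUMIF".toList then some "conditional sum" else none)
    else if c = 'A' then (if name = "AVERAGE".toList then some "avg" else none)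
    else if c = 'C' then (if name = "COUNT".toList then some "count" else if name = "COUNTIF".toList then some "conditional count" else none)
    else if c = 'M' then (if name = "MAX".toList then some "max" else if name = "MIN".toList then some "min" else if name = "MATCH".toList then some "match" else none)
    else if c = 'V' ∨ c = 'H' then (if name = "VLOOKUP".toList ∨ name = "HLOOKUP".toList then some "lookup" else none)
    else if c = 'I' then (if name = "IF".toList then some "conditional" else if name = "INDEX".toList then some "index" else none)
    else none

def formula_annotation_py_alt (formula : String) : String :=
  if formula.toList.isEmpty || !PySem.Chars.startswith formula.toList ['='] then ""
  else  -- body = formula[1:].strip().upper(), inlined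
    match pvFindName (PySem.Chars.upper (PySem.Chars.strip (PySem.List.slice formula.toList (some 1) none))) with
    | some name =>
      match pvLabelOf name with
      | some lab => pvAnnot lab formula
      | none => pvAnnot "formula" formula
    | none => pvAnnot "formula" formula

-- ===== PRECONDITION & SPEC =====
def Spec_formula_annotation_py (formula : String) (out : String) : Prop := out = formula_annotation_py_alt formula
instance (formula : String) (out : String) : Decidable (Spec_formula_annotation_py formula out) := by unfold Spec_formula_annotation_py; infer_instance

-- ===== CLAIM (what is proved, stated in full; the proofs are below) =====
def Claim_equal_formula_annotation_py : Prop := ∀ (formula : String), Dom_formula_annotation_py formula → Spec_formula_annotation_py formula (formula_annotation_py formula)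

-- ===== LEMMAS AND PROOFS =====

-- takeWhile up to the first '(' of k ++ '(' :: t is k, when k is '('-free
theorem pv_takeWhile_key (k t : List Char) (hk : '(' ∉ k) :
    (k ++ '(' :: t).takeWhile (fun c => c ≠ '(') = k := by
  induction k with
  | nil => rw [List.nil_append, List.takeWhile_cons_of_neg (by simp)]
  | cons a k ih =>
    have ha : a ≠ '(' := by rintro rfl; exact hk (by simp)
    rw [List.cons_append, List.takeWhile_cons_of_pos (by simpa using ha),
        ih (fun h => hk (by simp [h]))]

-- 'f_upper startswith (k + "(")' ↔ the part of f before its first '(' is exactly k (k itself '('-free)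
theorem pv_hit_iff (f k : List Char) (hk : '(' ∉ k) :
    PySem.Chars.startswith f (k ++ ['(']) = true ↔
      (f.takeWhile (fun c => c ≠ '(') = k ∧ '(' ∈ f) := by
  rw [PySem.Chars.startswith_iff]
  constructor
  · rintro ⟨t, rfl⟩
    rw [List.append_assoc, List.singleton_append]
    exact ⟨pv_takeWhile_key k t hk, by simp⟩
  · rintro ⟨hname, hmem⟩
    have hsplit := (List.takeWhile_append_dropWhile (p := fun c => decide (c ≠ '(')) (l := f)).symm
    have hne : f.dropWhile (fun c => decide (c ≠ '(')) ≠ [] := by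
      intro h0
      rw [h0, List.append_nil] at hsplit
      have := List.mem_takeWhile_imp (p := fun c => decide (c ≠ '(')) (l := f) (hsplit ▸ hmem)
      simp at this
    have hhead : (f.dropWhile (fun c => decide (c ≠ '('))).head hne = '(' := by
      have := List.head_dropWhile_not (p := fun c => decide (c ≠ '(')) (l := f) hne
      simpa using this
    refine ⟨(f.dropWhile (fun c => decide (c ≠ '('))).tail, ?_⟩
    rw [List.append_assoc, List.singleton_append]
    conv_rhs => rw [hsplit]
    have hdw : '(' :: (f.dropWhile (fun c => decide (c ≠ '('))).tail =
        f.dropWhile (fun c => decide (c ≠ '(')) := by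
      conv_rhs => rw [← List.cons_head_tail hne]
      rw [hhead]
    rw [hname, hdw]

-- B's character scan returns the prefix before the first '(' iff a '(' occurs
theorem pv_findName_eq (f : List Char) :
    pvFindName f = (if '(' ∈ f then some (f.takeWhile (fun c => c ≠ '(')) else none) := by
  induction f with
  | nil => rfl
  | cons c rest ih =>
    by_cases hc : c = '('
    · subst hc
      rw [pvFindName, if_pos rfl, if_pos (by simp), List.takeWhile_cons_of_neg (by simp)]
    · rw [pvFindName, if_neg hc, ih, List.takeWhile_cons_of_pos (by simpa using hc)]
      by_cases hmem : '(' ∈ rest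
      · rw [if_pos hmem, if_pos (by simp [hmem]), Option.map_some]
      · rw [if_neg hmem, if_neg (by simp [hmem, Ne.symm hc]), Option.map_none]

-- A's table scan equals B's decision tree on the parsed name (given a '(' occurs in f)
theorem pv_scan_eq_labelOf (f : List Char) (hmem : '(' ∈ f) :
    pvScan f pvLabels = pvLabelOf (f.takeWhile (fun c => c ≠ '(')) := by
  have hcond : ∀ (k : List Char), '(' ∉ k →
      (PySem.Chars.startswith f (k ++ ['(']) = true ↔ f.takeWhile (fun c => c ≠ '(') = k) := by
    intro k hk
    rw [pv_hit_iff f k hk]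
    exact ⟨fun h => h.1, fun h => ⟨h, hmem⟩⟩
  set n := f.takeWhile (fun c => c ≠ '(') with hn
  show pvScan f pvLabels = pvLabelOf n
  by_cases h1 : n = "SUM".toList
  · simp only [pvLabels, pvScan, if_pos ((hcond _ (by decide)).mpr h1)]
    rw [h1]; rfl
  by_cases h2 : n = "AVERAGE".toList
  · simp only [pvLabels, pvScan,
      if_neg (fun h => h1 ((hcond _ (by decide)).mp h)),
      if_pos ((hcond _ (by decide)).mpr h2)]
    rw [h2]; rfl
  by_cases h3 : n = "COUNT".toList
  · simp only [pvLabels, pvScan,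
      if_neg (fun h => h1 ((hcond _ (by decide)).mp h)),
      if_neg (fun h => h2 ((hcond _ (by decide)).mp h)),
      if_pos ((hcond _ (by decide)).mpr h3)]
    rw [h3]; rfl
  by_cases h4 : n = "MAX".toList
  · simp only [pvLabels, pvScan,
      if_neg (fun h => h1 ((hcond _ (by decide)).mp h)),
      if_neg (fun h => h2 ((hcond _ (by decide)).mp h)),
      if_neg (fun h => h3 ((hcond _ (by decide)).mp h)),
      if_pos ((hcond _ (by decide)).mpr h4)]
    rw [h4]; rfl
  by_cases h5 : n = "MIN".toList
  · simp only [pvLabels, pvScan,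
      if_neg (fun h => h1 ((hcond _ (by decide)).mp h)),
      if_neg (fun h => h2 ((hcond _ (by decide)).mp h)),
      if_neg (fun h => h3 ((hcond _ (by decide)).mp h)),
      if_neg (fun h => h4 ((hcond _ (by decide)).mp h)),
      if_pos ((hcond _ (by decide)).mpr h5)]
    rw [h5]; rfl
  by_cases h6 : n = "VLOOKUP".toList
  · simp only [pvLabels, pvScan,
      if_neg (fun h => h1 ((hcond _ (by decide)).mp h)),
      if_neg (fun h => h2 ((hcond _ (by decide)).mp h)),
      if_neg (fun h => h3 ((hcond _ (by decide)).mp h)),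
      if_neg (fun h => h4 ((hcond _ (by decide)).mp h)),
      if_neg (fun h => h5 ((hcond _ (by decide)).mp h)),
      if_pos ((hcond _ (by decide)).mpr h6)]
    rw [h6]; rfl
  by_cases h7 : n = "HLOOKUP".toList
  · simp only [pvLabels, pvScan,
      if_neg (fun h => h1 ((hcond _ (by decide)).mp h)),
      if_neg (fun h => h2 ((hcond _ (by decide)).mp h)),
      if_neg (fun h => h3 ((hcond _ (by decide)).mp h)),
      if_neg (fun h => h4 ((hcond _ (by decide)).mp h)),
      if_neg (fun h => h5 ((hcond _ (by decide)).mp h)),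
      if_neg (fun h => h6 ((hcond _ (by decide)).mp h)),
      if_pos ((hcond _ (by decide)).mpr h7)]
    rw [h7]; rfl
  by_cases h8 : n = "IF".toList
  · simp only [pvLabels, pvScan,
      if_neg (fun h => h1 ((hcond _ (by decide)).mp h)),
      if_neg (fun h => h2 ((hcond _ (by decide)).mp h)),
      if_neg (fun h => h3 ((hcond _ (by decide)).mp h)),
      if_neg (fun h => h4 ((hcond _ (by decide)).mp h)),
      if_neg (fun h => h5 ((hcond _ (by decide)).mp h)),
      if_neg (fun h => h6 ((hcond _ (by decide)).mp h)),
      if_neg (fun h => h7 ((hcond _ (by decide)).mp h)),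
      if_pos ((hcond _ (by decide)).mpr h8)]
    rw [h8]; rfl
  by_cases h9 : n = "SUMIF".toList
  · simp only [pvLabels, pvScan,
      if_neg (fun h => h1 ((hcond _ (by decide)).mp h)),
      if_neg (fun h => h2 ((hcond _ (by decide)).mp h)),
      if_neg (fun h => h3 ((hcond _ (by decide)).mp h)),
      if_neg (fun h => h4 ((hcond _ (by decide)).mp h)),
      if_neg (fun h => h5 ((hcond _ (by decide)).mp h)),
      if_neg (fun h => h6 ((hcond _ (by decide)).mp h)),
      if_neg (fun h => h7 ((hcond _ (by decide)).mp h)),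
      if_neg (fun h => h8 ((hcond _ (by decide)).mp h)),
      if_pos ((hcond _ (by decide)).mpr h9)]
    rw [h9]; rfl
  by_cases h10 : n = "COUNTIF".toList
  · simp only [pvLabels, pvScan,
      if_neg (fun h => h1 ((hcond _ (by decide)).mp h)),
      if_neg (fun h => h2 ((hcond _ (by decide)).mp h)),
      if_neg (fun h => h3 ((hcond _ (by decide)).mp h)),
      if_neg (fun h => h4 ((hcond _ (by decide)).mp h)),
      if_neg (fun h => h5 ((hcond _ (by decide)).mp h)),
      if_neg (fun h => h6 ((hcond _ (by decide)).mp h)),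
      if_neg (fun h => h7 ((hcond _ (by decide)).mp h)),
      if_neg (fun h => h8 ((hcond _ (by decide)).mp h)),
      if_neg (fun h => h9 ((hcond _ (by decide)).mp h)),
      if_pos ((hcond _ (by decide)).mpr h10)]
    rw [h10]; rfl
  by_cases h11 : n = "INDEX".toList
  · simp only [pvLabels, pvScan,
      if_neg (fun h => h1 ((hcond _ (by decide)).mp h)),
      if_neg (fun h => h2 ((hcond _ (by decide)).mp h)),
      if_neg (fun h => h3 ((hcond _ (by decide)).mp h)),
      if_neg (fun h => h4 ((hcond _ (by decide)).mp h)),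
      if_neg (fun h => h5 ((hcond _ (by decide)).mp h)),
      if_neg (fun h => h6 ((hcond _ (by decide)).mp h)),
      if_neg (fun h => h7 ((hcond _ (by decide)).mp h)),
      if_neg (fun h => h8 ((hcond _ (by decide)).mp h)),
      if_neg (fun h => h9 ((hcond _ (by decide)).mp h)),
      if_neg (fun h => h10 ((hcond _ (by decide)).mp h)),
      if_pos ((hcond _ (by decide)).mpr h11)]
    rw [h11]; rfl
  by_cases h12 : n = "MATCH".toList
  · simp only [pvLabels, pvScan,
      if_neg (fun h => h1 ((hcond _ (by decide)).mp h)),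
      if_neg (fun h => h2 ((hcond _ (by decide)).mp h)),
      if_neg (fun h => h3 ((hcond _ (by decide)).mp h)),
      if_neg (fun h => h4 ((hcond _ (by decide)).mp h)),
      if_neg (fun h => h5 ((hcond _ (by decide)).mp h)),
      if_neg (fun h => h6 ((hcond _ (by decide)).mp h)),
      if_neg (fun h => h7 ((hcond _ (by decide)).mp h)),
      if_neg (fun h => h8 ((hcond _ (by decide)).mp h)),
      if_neg (fun h => h9 ((hcond _ (by decide)).mp h)),
      if_neg (fun h => h10 ((hcond _ (by decide)).mp h)),
      if_neg (fun h => h11 ((hcond _ (by decide)).mp h)),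
      if_pos ((hcond _ (by decide)).mpr h12)]
    rw [h12]; rfl
  -- no key matches: scan falls through to none; the tree returns none too
  · have hscan : pvScan f pvLabels = none := by
      simp only [pvLabels, pvScan,
        if_neg (fun h => h1 ((hcond _ (by decide)).mp h)),
        if_neg (fun h => h2 ((hcond _ (by decide)).mp h)),
        if_neg (fun h => h3 ((hcond _ (by decide)).mp h)),
        if_neg (fun h => h4 ((hcond _ (by decide)).mp h)),
        if_neg (fun h => h5 ((hcond _ (by decide)).mp h)),
        if_neg (fun h => h6 ((hcond _ (by decide)).mp h)),
        if_neg (fun h => h7 ((hcond _ (by decide)).mp h)),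
        if_neg (fun h => h8 ((hcond _ (by decide)).mp h)),
        if_neg (fun h => h9 ((hcond _ (by decide)).mp h)),
        if_neg (fun h => h10 ((hcond _ (by decide)).mp h)),
        if_neg (fun h => h11 ((hcond _ (by decide)).mp h)),
        if_neg (fun h => h12 ((hcond _ (by decide)).mp h))]
    rw [hscan]
    rcases hn' : n with _ | ⟨c, t⟩
    · rfl
    · rw [hn'] at h1 h2 h3 h4 h5 h6 h7 h8 h9 h10 h11 h12
      unfold pvLabelOf
      split_ifs <;> simp_all
-- ===== VERDICT (by name: the statement is the Claim_ definition above) =====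
theorem formula_annotation_py_spec : Claim_equal_formula_annotation_py := by
  intro formula _
  unfold Spec_formula_annotation_py formula_annotation_py formula_annotation_py_alt
  by_cases hguard : (formula.toList.isEmpty || !PySem.Chars.startswith formula.toList ['=']) = true
  · rw [if_pos hguard, if_pos hguard]
  · rw [if_neg hguard, if_neg hguard]
    set f := PySem.Chars.upper (PySem.Chars.strip (PySem.List.slice formula.toList (some 1) none)) with hf
    rw [pv_findName_eq f]
    by_cases hmem : '(' ∈ f
    · rw [if_pos hmem, pv_scan_eq_labelOf f hmem]
    · have hno : ∀ (k : List Char), '(' ∉ k → ¬ PySem.Chars.startswith f (k ++ ['(']) = true :=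
        fun k hk h => hmem ((pv_hit_iff f k hk).mp h).2
      have hscan : pvScan f pvLabels = none := by
        simp only [pvLabels, pvScan,
          if_neg (hno "SUM".toList (by decide)),
          if_neg (hno "AVERAGE".toList (by decide)),
          if_neg (hno "COUNT".toList (by decide)),
          if_neg (hno "MAX".toList (by decide)),
          if_neg (hno "MIN".toList (by decide)),
          if_neg (hno "VLOOKUP".toList (by decide)),
          if_neg (hno "HLOOKUP".toList (by decide)),
          if_neg (hno "IF".toList (by decide)),
          if_neg (hno "SUMIF".toList (by decide)),
          if_neg (hno "COUNTIF".toList (by decide)),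
          if_neg (hno "INDEX".toList (by decide)),
          if_neg (hno "MATCH".toList (by decide))]
      rw [if_neg hmem, hscan]
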